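-- pv_equiv track=rewrite | github.com/handorff/advent-of-code | 2024/20/20.py | get_all_possible_cheats_b
-- ===== SOURCE A (Python) =====
-- def in_bounds(i, j, bounds):
--   return i >= 0 and j >= 0 and i < bounds[0] and j < bounds[1]
--
-- def get_all_possible_cheats_b(bounds):
--   cheats = []
--   for i in range(bounds[0]):
--     for j in range(bounds[1]):
--       cheat_before = (i, j)
--       for d in range(1, 21):
--         for di in range(d + 1):
--           dj = d - di
--           for i2, j2 in [(i + di, j + dj), (i + di, j - dj), (i - di, j + dj), (i - di, j - dj)]:
--             if in_bounds(i2, j2, bounds):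
--               cheat_after = (i2, j2)
--               yield((cheat_before, cheat_after))
-- ===== SOURCE B (Python) =====
-- # master table of all signed offsets with 1 <= Manhattan distance <= 20,
-- # in the (d, di, reflection) order of the problem's distance pattern
-- OFFSETS = [(s1 * di, s2 * (d - di))
--            for d in range(1, 21)
--            for di in range(d + 1)
--            for s1, s2 in ((1, 1), (1, -1), (-1, 1), (-1, -1))]
--
-- def get_all_possible_cheats_b(bounds):
--   m, n = bounds[0], bounds[1]
--   cache = {}  # clip signature -> filtered offset list, shared by all cells with that signature
--   out = []
--   for i in range(m):
--     for j in range(n):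
--       key = (min(i, 20), min(m - 1 - i, 20), min(j, 20), min(n - 1 - j, 20))
--       offs = cache.get(key)
--       if offs is None:
--         offs = [dd for dd in OFFSETS
--                 if -key[0] <= dd[0] <= key[1] and -key[2] <= dd[1] <= key[3]]
--         cache[key] = offs
--       for ddi, ddj in offs:
--         out.append(((i, j), (i + ddi, j + ddj)))
--   return out
-- ===== Notes on version B (the rewrite author's own statement) =====
-- stated objective: alternative
-- what changed: B builds one module-level master offset table and memoizes, in a dict keyed by each cell's clip signature (distance to the four borders capped at 20), the bounds-filtered offset list, so interior cells share one precomputed list and emit pairs by pure translation instead of re-running A's d/di distance-pattern loops with a bounds check per candidate at every cell.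
import Mathlib
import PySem

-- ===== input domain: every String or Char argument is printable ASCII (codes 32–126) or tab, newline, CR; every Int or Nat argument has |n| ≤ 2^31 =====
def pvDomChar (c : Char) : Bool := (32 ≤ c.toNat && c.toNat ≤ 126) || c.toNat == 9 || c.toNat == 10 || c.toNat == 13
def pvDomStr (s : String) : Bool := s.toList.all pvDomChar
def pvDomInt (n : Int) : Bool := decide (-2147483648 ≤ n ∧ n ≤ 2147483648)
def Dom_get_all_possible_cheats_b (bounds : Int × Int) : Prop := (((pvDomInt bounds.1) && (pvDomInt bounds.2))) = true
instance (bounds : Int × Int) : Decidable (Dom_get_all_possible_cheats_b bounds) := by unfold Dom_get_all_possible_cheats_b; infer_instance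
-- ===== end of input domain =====

-- B replaces A's per-cell regeneration of the distance pattern by a master offset table
-- plus a dict cache of bounds-filtered offset lists keyed by each cell's clip signature;
-- objective: alternative (A is a Python generator; the equivalence is about the yielded
-- sequence as a list).

-- ===== PORT A =====
def in_bounds (i j : Int) (bounds : Int × Int) : Bool :=
  decide (i ≥ 0) && decide (j ≥ 0) && decide (i < bounds.1) && decide (j < bounds.2)

def get_all_possible_cheats_b (bounds : Int × Int) : List ((Int × Int) × (Int × Int)) :=
  (PySem.List.pyRange 0 bounds.1 1).foldl (fun cheats i =>
    (PySem.List.pyRange 0 bounds.2 1).foldl (fun cheats j =>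
      let cheat_before := (i, j)
      (PySem.List.pyRange 1 21 1).foldl (fun cheats d =>
        (PySem.List.pyRange 0 (d + 1) 1).foldl (fun cheats di =>
          let dj := d - di
          [(i + di, j + dj), (i + di, j - dj), (i - di, j + dj), (i - di, j - dj)].foldl
            (fun cheats p =>
              if in_bounds p.1 p.2 bounds then cheats ++ [(cheat_before, p)] else cheats)
            cheats) cheats) cheats) cheats) []

-- ===== PORT B =====
-- the module-level OFFSETS comprehension of Source B
def pvOFFSETS : List (Int × Int) :=
  (PySem.List.pyRange 1 21 1).flatMap (fun d =>
    (PySem.List.pyRange 0 (d + 1) 1).flatMap (fun di =>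
      ([((1 : Int), (1 : Int)), (1, -1), (-1, 1), (-1, -1)]).map
        (fun s => (s.1 * di, s.2 * (d - di)))))

def get_all_possible_cheats_b_alt (bounds : Int × Int) : List ((Int × Int) × (Int × Int)) :=
  let m := bounds.1
  let n := bounds.2
  ((PySem.List.pyRange 0 m 1).foldl (fun st i =>
    (PySem.List.pyRange 0 n 1).foldl (fun st j =>
      let key : Int × Int × Int × Int :=
        (min i 20, min (m - 1 - i) 20, min j 20, min (n - 1 - j) 20)
      let res :=
        match st.1.get? key with
        | some offs => (st.1, offs)
        | none =>
          let offs := pvOFFSETS.filter (fun (dd : Int × Int) =>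
            decide (-key.1 ≤ dd.1) && decide (dd.1 ≤ key.2.1) &&
            decide (-key.2.2.1 ≤ dd.2) && decide (dd.2 ≤ key.2.2.2))
          (st.1.insert key offs, offs)
      (res.1, res.2.foldl (fun out dd => out ++ [((i, j), (i + dd.1, j + dd.2))]) st.2))
    st)
    ((PySem.Dict.empty : PySem.Dict (Int × Int × Int × Int) (List (Int × Int))), [])).2

-- ===== PRECONDITION & SPEC =====
def Spec_get_all_possible_cheats_b (bounds : Int × Int) (out : List ((Int × Int) × (Int × Int))) : Prop := out = get_all_possible_cheats_b_alt bounds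
instance (bounds : Int × Int) (out : List ((Int × Int) × (Int × Int))) : Decidable (Spec_get_all_possible_cheats_b bounds out) := by unfold Spec_get_all_possible_cheats_b; infer_instance

-- ===== CLAIM (what is proved, stated in full; the proofs are below) =====
def Claim_equal_get_all_possible_cheats_b : Prop := ∀ (bounds : Int × Int), Dom_get_all_possible_cheats_b bounds → Spec_get_all_possible_cheats_b bounds (get_all_possible_cheats_b bounds)

-- ===== LEMMAS AND PROOFS =====

-- B's clip signature of the cell (i, j)
def pvKey (m n i j : Int) : Int × Int × Int × Int :=
  (min i 20, min (m - 1 - i) 20, min j 20, min (n - 1 - j) 20)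

-- B's filter test for a signature
def pvCond (key : Int × Int × Int × Int) (dd : Int × Int) : Bool :=
  decide (-key.1 ≤ dd.1) && decide (dd.1 ≤ key.2.1) &&
  decide (-key.2.2.1 ≤ dd.2) && decide (dd.2 ≤ key.2.2.2)

-- the offset list cached for a signature
def pvOffsFor (key : Int × Int × Int × Int) : List (Int × Int) :=
  pvOFFSETS.filter (pvCond key)

-- cache invariant: every stored value is the filtered list of its key
def pvInv (cache : PySem.Dict (Int × Int × Int × Int) (List (Int × Int))) : Prop :=
  ∀ k v, cache.get? k = some v → v = pvOffsFor k

-- every master offset has both coordinates in [-20, 20]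
set_option maxRecDepth 8192 in
theorem pvOFFSETS_bounded :
    ∀ dd ∈ pvOFFSETS, -20 ≤ dd.1 ∧ dd.1 ≤ 20 ∧ -20 ≤ dd.2 ∧ dd.2 ≤ 20 := by decide

-- on master offsets, B's signature test equals A's bounds test
theorem pvCond_eq (m n i j : Int)
    (dd : Int × Int) (hdd : dd ∈ pvOFFSETS) :
    pvCond (pvKey m n i j) dd = in_bounds (i + dd.1) (j + dd.2) (m, n) := by
  obtain ⟨h1, h2, h3, h4⟩ := pvOFFSETS_bounded dd hdd
  simp only [pvCond, pvKey, in_bounds, ge_iff_le]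
  by_cases c1 : (0 : Int) ≤ i + dd.1 <;> by_cases c2 : i + dd.1 < m <;>
    by_cases c3 : (0 : Int) ≤ j + dd.2 <;> by_cases c4 : j + dd.2 < n <;>
    simp [c1, c2, c3, c4] <;> omega

-- A's per-cell emission, written as one function of the accumulator
def pvACell (bounds : Int × Int) (i j : Int) (cheats : List ((Int × Int) × (Int × Int))) :
    List ((Int × Int) × (Int × Int)) :=
  (PySem.List.pyRange 1 21 1).foldl (fun cheats d =>
    (PySem.List.pyRange 0 (d + 1) 1).foldl (fun cheats di =>
      let dj := d - di
      [(i + di, j + dj), (i + di, j - dj), (i - di, j + dj), (i - di, j - dj)].foldl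
        (fun cheats p =>
          if in_bounds p.1 p.2 bounds then cheats ++ [((i, j), p)] else cheats)
        cheats) cheats) cheats

-- A's per-cell fold is the bounds-filtered master table, translated to the cell
theorem pvACell_eq (bounds : Int × Int) (i j : Int) (acc : List ((Int × Int) × (Int × Int))) :
    pvACell bounds i j acc =
      acc ++ (pvOFFSETS.filter (fun dd => in_bounds (i + dd.1) (j + dd.2) bounds)).map
        (fun dd => ((i, j), (i + dd.1, j + dd.2))) := by
  have h : pvACell bounds i j acc =
      pvOFFSETS.foldl (fun acc dd =>
        if in_bounds (i + dd.1) (j + dd.2) bounds then acc ++ [((i, j), (i + dd.1, j + dd.2))]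
        else acc) acc := by
    unfold pvACell pvOFFSETS
    simp only [List.foldl_flatMap, List.foldl_map]
    apply PySem.List.foldl_congr_mem
    intro a d _
    apply PySem.List.foldl_congr_mem
    intro a' di _
    simp [List.foldl, sub_eq_add_neg]
  rw [h, PySem.List.foldl_append_if]

-- the translated emission both programs make at the cell (i, j)
def pvEmit (m n i j : Int) (out : List ((Int × Int) × (Int × Int))) :
    List ((Int × Int) × (Int × Int)) :=
  out ++ (pvOffsFor (pvKey m n i j)).map (fun dd => ((i, j), (i + dd.1, j + dd.2)))

theorem pvACell_emit (m n i j : Int) (acc : List ((Int × Int) × (Int × Int))) :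
    pvACell (m, n) i j acc = pvEmit m n i j acc := by
  rw [pvACell_eq]
  unfold pvEmit pvOffsFor
  congr 2
  exact (List.filter_congr (fun dd hdd => pvCond_eq m n i j dd hdd)).symm

-- B's per-cell body
def pvBBody (m n : Int)
    (st : PySem.Dict (Int × Int × Int × Int) (List (Int × Int)) × List ((Int × Int) × (Int × Int)))
    (i j : Int) :
    PySem.Dict (Int × Int × Int × Int) (List (Int × Int)) × List ((Int × Int) × (Int × Int)) :=
  let key : Int × Int × Int × Int :=
    (min i 20, min (m - 1 - i) 20, min j 20, min (n - 1 - j) 20)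
  let res :=
    match st.1.get? key with
    | some offs => (st.1, offs)
    | none =>
      let offs := pvOFFSETS.filter (fun (dd : Int × Int) =>
        decide (-key.1 ≤ dd.1) && decide (dd.1 ≤ key.2.1) &&
        decide (-key.2.2.1 ≤ dd.2) && decide (dd.2 ≤ key.2.2.2))
      (st.1.insert key offs, offs)
  (res.1, res.2.foldl (fun out dd => out ++ [((i, j), (i + dd.1, j + dd.2))]) st.2)

theorem pvBBody_emit (m n i j : Int)
    (st : PySem.Dict (Int × Int × Int × Int) (List (Int × Int)) × List ((Int × Int) × (Int × Int)))
    (hinv : pvInv st.1) :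
    (pvBBody m n st i j).2 = pvEmit m n i j st.2 ∧ pvInv (pvBBody m n st i j).1 := by
  unfold pvBBody pvEmit
  cases hget : st.1.get? (min i 20, min (m - 1 - i) 20, min j 20, min (n - 1 - j) 20) with
  | some offs =>
    have hoffs : offs = pvOffsFor (pvKey m n i j) := hinv _ _ (by simpa [pvKey] using hget)
    simp only [hget, PySem.List.foldl_append_singleton_eq_map]
    exact ⟨by rw [hoffs], hinv⟩
  | none =>
    simp only [hget, PySem.List.foldl_append_singleton_eq_map]
    constructor
    · rfl
    · intro k v hkv
      rw [PySem.Dict.get?_insert] at hkv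
      split at hkv
      · rename_i hk
        cases hkv
        subst hk
        rfl
      · exact hinv k v hkv

-- the whole inner (j) loop
theorem pvRow_eq (m n i : Int) (js : List Int)
    (st : PySem.Dict (Int × Int × Int × Int) (List (Int × Int)) × List ((Int × Int) × (Int × Int)))
    (hinv : pvInv st.1) :
    (js.foldl (fun st j => pvBBody m n st i j) st).2 =
      js.foldl (fun out j => pvACell (m, n) i j out) st.2 ∧
    pvInv (js.foldl (fun st j => pvBBody m n st i j) st).1 := by
  induction js generalizing st with
  | nil => exact ⟨rfl, hinv⟩
  | cons j js ih =>
    simp only [List.foldl_cons]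
    obtain ⟨h1, h2⟩ := pvBBody_emit m n i j st hinv
    obtain ⟨h1', h2'⟩ := ih (pvBBody m n st i j) h2
    refine ⟨?_, h2'⟩
    rw [h1', h1, pvACell_emit]

-- the whole outer (i) loop
theorem pvGrid_eq (m n : Int) (is : List Int)
    (st : PySem.Dict (Int × Int × Int × Int) (List (Int × Int)) × List ((Int × Int) × (Int × Int)))
    (hinv : pvInv st.1) :
    (is.foldl (fun st i => (PySem.List.pyRange 0 n 1).foldl (fun st j => pvBBody m n st i j) st) st).2 =
      is.foldl (fun out i => (PySem.List.pyRange 0 n 1).foldl (fun out j => pvACell (m, n) i j out) out) st.2 ∧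
    pvInv (is.foldl (fun st i => (PySem.List.pyRange 0 n 1).foldl (fun st j => pvBBody m n st i j) st) st).1 := by
  induction is generalizing st with
  | nil => exact ⟨rfl, hinv⟩
  | cons i is ih =>
    simp only [List.foldl_cons]
    obtain ⟨h1, h2⟩ := pvRow_eq m n i (PySem.List.pyRange 0 n 1) st hinv
    obtain ⟨h1', h2'⟩ :=
      ih ((PySem.List.pyRange 0 n 1).foldl (fun st j => pvBBody m n st i j) st) h2
    refine ⟨?_, h2'⟩
    rw [h1']
    congr 1

theorem pv_spec_main : ∀ (bounds : Int × Int),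
    get_all_possible_cheats_b bounds = get_all_possible_cheats_b_alt bounds := by
  intro ⟨m, n⟩
  have hb : get_all_possible_cheats_b_alt (m, n) =
      ((PySem.List.pyRange 0 m 1).foldl (fun st i =>
          (PySem.List.pyRange 0 n 1).foldl (fun st j => pvBBody m n st i j) st)
        ((PySem.Dict.empty : PySem.Dict (Int × Int × Int × Int) (List (Int × Int))), [])).2 := rfl
  have ha : get_all_possible_cheats_b (m, n) =
      (PySem.List.pyRange 0 m 1).foldl (fun out i =>
        (PySem.List.pyRange 0 n 1).foldl (fun out j => pvACell (m, n) i j out) out) [] := rfl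
  rw [ha, hb]
  have hinv : pvInv (PySem.Dict.empty : PySem.Dict (Int × Int × Int × Int) (List (Int × Int))) := by
    intro k v hkv
    simp [PySem.Dict.get?, PySem.Dict.empty] at hkv
  exact (pvGrid_eq m n (PySem.List.pyRange 0 m 1) (PySem.Dict.empty, []) hinv).1.symm

-- ===== VERDICT (by name: the statement is the Claim_ definition above) =====
theorem get_all_possible_cheats_b_spec : Claim_equal_get_all_possible_cheats_b := by
  intro bounds _
  unfold Spec_get_all_possible_cheats_b
  exact pv_spec_main bounds
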